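-- pv_equiv track=rewrite | github.com/tobiasborregaard/acm_protocol_p6 | hardware_Implementation/dlc/protocol.py | findStartByte
-- ===== SOURCE A (Python) =====
-- def findStartByte(bytestocheck):
--     startbyte = 0xE9
--
--     for i in range(1, len(bytestocheck)):
--         data1, data2 = bytestocheck[i-1], bytestocheck[i]
--         new_byte = data1
--
--         for x in range(8):
--             if new_byte == startbyte:
--                 return x  # Return index for start byte
--
--             new_byte = ((new_byte << 1) | ((data2 >> (7-x)) & 1)) & 0xFF
--
--         if new_byte == startbyte:
--             return 0
--
--     return -1
-- ===== SOURCE B (Python) =====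
-- def findStartByte(bytestocheck):
--     n = len(bytestocheck)
--     if n < 2:
--         return -1
--     if bytestocheck[0] == 0xE9:
--         return 0
--     data = [b & 0xFF for b in bytestocheck]
--     for p in range(1, 8 * (n - 1) + 1):
--         i, r = divmod(p, 8)
--         w = data[i] if r == 0 else (data[i] * 256 + data[i + 1]) // 2 ** (8 - r) % 256
--         if w == 0xE9:
--             return p % 8
--     return -1
-- ===== Notes on version B (the rewrite author's own statement) =====
-- stated objective: alternative
-- what changed: A slides an 8-bit shift register across consecutive byte pairs with nested byte/bit loops; B masks the bytes once and does a single flat scan over global bit positions, extracting each window in closed form by index arithmetic (divmod) and returning the first matching position mod 8.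
import Mathlib
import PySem

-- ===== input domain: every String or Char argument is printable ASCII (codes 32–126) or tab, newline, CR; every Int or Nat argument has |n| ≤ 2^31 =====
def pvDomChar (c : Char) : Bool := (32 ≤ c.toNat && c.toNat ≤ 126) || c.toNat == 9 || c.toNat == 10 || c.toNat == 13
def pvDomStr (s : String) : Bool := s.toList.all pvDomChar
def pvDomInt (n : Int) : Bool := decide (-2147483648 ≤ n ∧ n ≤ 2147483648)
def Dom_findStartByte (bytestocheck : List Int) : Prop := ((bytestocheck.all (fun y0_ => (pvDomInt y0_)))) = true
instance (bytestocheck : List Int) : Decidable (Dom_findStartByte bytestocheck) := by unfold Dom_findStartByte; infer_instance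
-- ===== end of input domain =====

-- B replaces A's nested byte-pair/bit shift-register loops by one flat scan over global bit
-- positions, reading each 8-bit window in closed form from a masked byte list (objective: alternative).

-- ===== PORT A =====
-- inner loop 'for x in range(8)' plus the trailing 'if new_byte == startbyte: return 0' (reached at x = 8)
def pairGo (data2 : Int) (new_byte : Int) (x : Nat) : Option Int :=
  if x < 8 then
    if new_byte = 233 then some (x : Int)
    else pairGo data2
      (PySem.Int.band (PySem.Int.bor (new_byte <<< (1:Nat)) (PySem.Int.band (data2 >>> (7 - x)) 1)) 255)
      (x + 1)
  else if new_byte = 233 then some 0 else none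
termination_by 8 - x

-- outer loop 'for i in range(1, len(bytestocheck))' walking consecutive pairs; 'some r' = early return
def findStartByteLoop : List Int → Option Int
  | data1 :: data2 :: rest =>
    match pairGo data2 data1 0 with
    | some r => some r
    | none => findStartByteLoop (data2 :: rest)
  | _ => none

def findStartByte (bytestocheck : List Int) : Int :=
  (findStartByteLoop bytestocheck).getD (-1)

-- ===== PORT B =====
def altData (l : List Int) : List Int := l.map (fun b => PySem.Int.band b 255)

def findStartByte_alt (bytestocheck : List Int) : Int :=
  let n : Int := bytestocheck.length
  if n < 2 then -1
  else if PySem.List.pyGetD bytestocheck 0 0 = 233 then 0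
  else
    let data := altData bytestocheck
    -- 'i, r = divmod(p, 8)' is floordiv/mod by 8; 'data[i]'/'data[i+1]' are in range for every p
    -- in the scan, so the total 'pyGetD _ _ 0' is exact; '2 ** (8 - r)' has exponent 1..8,
    -- so '.toNat' is exact
    match (PySem.List.pyRange 1 (8 * (n - 1) + 1) 1).find? (fun p =>
        (if PySem.Int.mod p 8 = 0 then PySem.List.pyGetD data (PySem.Int.floordiv p 8) 0
         else PySem.Int.mod (PySem.Int.floordiv
            (PySem.List.pyGetD data (PySem.Int.floordiv p 8) 0 * 256
              + PySem.List.pyGetD data (PySem.Int.floordiv p 8 + 1) 0)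
            (2 ^ (8 - PySem.Int.mod p 8).toNat)) 256) == 233) with
    | some p => PySem.Int.mod p 8
    | none => -1

-- ===== PRECONDITION & SPEC =====
def Spec_findStartByte (bytestocheck : List Int) (out : Int) : Prop := out = findStartByte_alt bytestocheck
instance (bytestocheck : List Int) (out : Int) : Decidable (Spec_findStartByte bytestocheck out) := by unfold Spec_findStartByte; infer_instance

-- ===== CLAIM (what is proved, stated in full; the proofs are below) =====
def Claim_equal_findStartByte : Prop := ∀ (bytestocheck : List Int), Dom_findStartByte bytestocheck → Spec_findStartByte bytestocheck (findStartByte bytestocheck)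

-- ===== LEMMAS AND PROOFS =====

-- Nat helper: OR-ing the low bit into an even number is addition
theorem pvLorTwoMulOne (m : ℕ) : 2*m ||| 1 = 2*m+1 := by
  apply Nat.eq_of_testBit_eq
  intro i
  rw [Nat.testBit_or]
  cases i with
  | zero =>
    rw [Nat.testBit_zero, Nat.testBit_zero, Nat.testBit_zero, ← Bool.decide_or, decide_eq_decide]
    omega
  | succ j =>
    rw [Nat.testBit_succ, Nat.testBit_succ, Nat.testBit_succ]
    have h1 : 2*m/2 = m := by omega
    have h2 : (2*m+1)/2 = m := by omega
    have h3 : 1/2 = 0 := by omega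
    rw [h1, h2, h3, Nat.zero_testBit, Bool.or_false]

-- '& 0xFF' is 'mod 256' on every Int (Python infinite two's complement)
theorem pvBand255 (a : Int) : PySem.Int.band a 255 = a % 256 := by
  have h255 : Int.toNat 255 = 255 := rfl
  have hN : ∀ m : ℕ, m &&& 255 = m % 256 := by
    intro m
    have := Nat.and_two_pow_sub_one_eq_mod m 8
    norm_num at this; exact this
  unfold PySem.Int.band
  split_ifs with h1 h2 h3
  · rw [h255, hN]; omega
  · norm_num at h2
  · rw [h255, Nat.and_comm, hN]; omega
  · norm_num at h3

-- OR-ing a single bit into an even Int is addition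
theorem pvBorBit (a b : Int) (hb : b = 0 ∨ b = 1) : PySem.Int.bor (2*a) b = 2*a + b := by
  rcases hb with rfl | rfl
  · simp [PySem.Int.bor_zero]
  · unfold PySem.Int.bor
    have h1 : Int.toNat 1 = 1 := rfl
    split_ifs with ha hb'
    · rw [h1]
      have h2 : (2*a).toNat = 2 * a.toNat := by omega
      rw [h2, pvLorTwoMulOne]; omega
    · norm_num at hb'
    · rw [h1, Nat.and_one_is_mod]
      have hm : (-(2*a) - 1).toNat % 2 = 1 := by omega
      rw [hm]; omega
    · norm_num at *

-- one inner-loop update of A, as plain arithmetic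
theorem pvStepEq (d2 w : Int) (t : Nat) :
    PySem.Int.band (PySem.Int.bor (w <<< (1:Nat)) (PySem.Int.band (d2 >>> t) 1)) 255
      = (2 * w + (d2 / 2^t) % 2) % 256 := by
  have hbit : PySem.Int.band (d2 >>> t) 1 = (d2 / 2^t) % 2 := by
    rw [PySem.Int.band_one, PySem.Int.mod_eq_emod_of_pos (by norm_num), Int.shiftRight_eq_div_pow]
    push_cast; ring_nf
  have hshl : w <<< (1:Nat) = 2 * w := by rw [Int.shiftLeft_eq]; ring
  rw [hbit, hshl, pvBorBit _ _ (Int.emod_two_eq _), pvBand255]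

-- the window value B reads at bit offset x (1 ≤ x ≤ 8) inside the pair (d1, d2)
def pvWb (d1 d2 x : Int) : Int := ((d1 % 256) * 256 + d2 % 256) / 2 ^ (8 - x).toNat % 256

theorem pairGo_lt (d2 w : Int) (x : Nat) (h : x < 8) :
    pairGo d2 w x = if w = 233 then some (x : Int) else
      pairGo d2 (PySem.Int.band (PySem.Int.bor (w <<< (1:Nat)) (PySem.Int.band (d2 >>> (7 - x)) 1)) 255) (x + 1) := by
  rw [pairGo.eq_def, if_pos h]

theorem pairGo_8 (d2 w : Int) : pairGo d2 w 8 = if w = 233 then some 0 else none := by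
  rw [pairGo.eq_def]; norm_num

-- A's inner loop = first hit among the 8 windows of the pair
theorem pvPairChar (d1 d2 : Int) (h : d1 ≠ 233) :
    pairGo d2 d1 0 =
      match ([1,2,3,4,5,6,7,8] : List Int).find? (fun x => pvWb d1 d2 x == 233) with
      | some x => some (x % 8)
      | none => none := by
  have e0 : PySem.Int.band (PySem.Int.bor (d1 <<< (1:Nat)) (PySem.Int.band (d2 >>> (7 - 0 : Nat)) 1)) 255 = pvWb d1 d2 1 := by
    rw [pvStepEq]; unfold pvWb
    rw [show ((8:Int) - 1).toNat = 7 from rfl]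
    norm_num
    omega
  have e1 : PySem.Int.band (PySem.Int.bor (pvWb d1 d2 1 <<< (1:Nat)) (PySem.Int.band (d2 >>> (7 - 1 : Nat)) 1)) 255 = pvWb d1 d2 2 := by
    rw [pvStepEq]; unfold pvWb
    rw [show ((8:Int) - 2).toNat = 6 from rfl]
    rw [show ((8:Int) - 1).toNat = 7 from rfl]
    norm_num
    omega
  have e2 : PySem.Int.band (PySem.Int.bor (pvWb d1 d2 2 <<< (1:Nat)) (PySem.Int.band (d2 >>> (7 - 2 : Nat)) 1)) 255 = pvWb d1 d2 3 := by
    rw [pvStepEq]; unfold pvWb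
    rw [show ((8:Int) - 3).toNat = 5 from rfl]
    rw [show ((8:Int) - 2).toNat = 6 from rfl]
    norm_num
    omega
  have e3 : PySem.Int.band (PySem.Int.bor (pvWb d1 d2 3 <<< (1:Nat)) (PySem.Int.band (d2 >>> (7 - 3 : Nat)) 1)) 255 = pvWb d1 d2 4 := by
    rw [pvStepEq]; unfold pvWb
    rw [show ((8:Int) - 4).toNat = 4 from rfl]
    rw [show ((8:Int) - 3).toNat = 5 from rfl]
    norm_num
    omega
  have e4 : PySem.Int.band (PySem.Int.bor (pvWb d1 d2 4 <<< (1:Nat)) (PySem.Int.band (d2 >>> (7 - 4 : Nat)) 1)) 255 = pvWb d1 d2 5 := by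
    rw [pvStepEq]; unfold pvWb
    rw [show ((8:Int) - 5).toNat = 3 from rfl]
    rw [show ((8:Int) - 4).toNat = 4 from rfl]
    norm_num
    omega
  have e5 : PySem.Int.band (PySem.Int.bor (pvWb d1 d2 5 <<< (1:Nat)) (PySem.Int.band (d2 >>> (7 - 5 : Nat)) 1)) 255 = pvWb d1 d2 6 := by
    rw [pvStepEq]; unfold pvWb
    rw [show ((8:Int) - 6).toNat = 2 from rfl]
    rw [show ((8:Int) - 5).toNat = 3 from rfl]
    norm_num
    omega
  have e6 : PySem.Int.band (PySem.Int.bor (pvWb d1 d2 6 <<< (1:Nat)) (PySem.Int.band (d2 >>> (7 - 6 : Nat)) 1)) 255 = pvWb d1 d2 7 := by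
    rw [pvStepEq]; unfold pvWb
    rw [show ((8:Int) - 7).toNat = 1 from rfl]
    rw [show ((8:Int) - 6).toNat = 2 from rfl]
    norm_num
    omega
  have e7 : PySem.Int.band (PySem.Int.bor (pvWb d1 d2 7 <<< (1:Nat)) (PySem.Int.band (d2 >>> (7 - 7 : Nat)) 1)) 255 = pvWb d1 d2 8 := by
    rw [pvStepEq]; unfold pvWb
    rw [show ((8:Int) - 8).toNat = 0 from rfl]
    rw [show ((8:Int) - 7).toNat = 1 from rfl]
    norm_num
    omega
  rw [pairGo_lt _ _ 0 (by norm_num), if_neg h, e0]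
  by_cases h1 : pvWb d1 d2 1 = 233
  · rw [pairGo_lt _ _ 1 (by norm_num), if_pos h1, List.find?_cons_of_pos (by simp [h1])]; norm_num
  · rw [pairGo_lt _ _ 1 (by norm_num), if_neg h1, e1, List.find?_cons_of_neg (by simp [h1])]
    by_cases h2 : pvWb d1 d2 2 = 233
    · rw [pairGo_lt _ _ 2 (by norm_num), if_pos h2, List.find?_cons_of_pos (by simp [h2])]; norm_num
    · rw [pairGo_lt _ _ 2 (by norm_num), if_neg h2, e2, List.find?_cons_of_neg (by simp [h2])]
      by_cases h3 : pvWb d1 d2 3 = 233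
      · rw [pairGo_lt _ _ 3 (by norm_num), if_pos h3, List.find?_cons_of_pos (by simp [h3])]; norm_num
      · rw [pairGo_lt _ _ 3 (by norm_num), if_neg h3, e3, List.find?_cons_of_neg (by simp [h3])]
        by_cases h4 : pvWb d1 d2 4 = 233
        · rw [pairGo_lt _ _ 4 (by norm_num), if_pos h4, List.find?_cons_of_pos (by simp [h4])]; norm_num
        · rw [pairGo_lt _ _ 4 (by norm_num), if_neg h4, e4, List.find?_cons_of_neg (by simp [h4])]
          by_cases h5 : pvWb d1 d2 5 = 233
          · rw [pairGo_lt _ _ 5 (by norm_num), if_pos h5, List.find?_cons_of_pos (by simp [h5])]; norm_num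
          · rw [pairGo_lt _ _ 5 (by norm_num), if_neg h5, e5, List.find?_cons_of_neg (by simp [h5])]
            by_cases h6 : pvWb d1 d2 6 = 233
            · rw [pairGo_lt _ _ 6 (by norm_num), if_pos h6, List.find?_cons_of_pos (by simp [h6])]; norm_num
            · rw [pairGo_lt _ _ 6 (by norm_num), if_neg h6, e6, List.find?_cons_of_neg (by simp [h6])]
              by_cases h7 : pvWb d1 d2 7 = 233
              · rw [pairGo_lt _ _ 7 (by norm_num), if_pos h7, List.find?_cons_of_pos (by simp [h7])]; norm_num
              · rw [pairGo_lt _ _ 7 (by norm_num), if_neg h7, e7, List.find?_cons_of_neg (by simp [h7])]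
                by_cases h8 : pvWb d1 d2 8 = 233
                · rw [pairGo_8, if_pos h8, List.find?_cons_of_pos (by simp [h8])]; norm_num
                · rw [pairGo_8, if_neg h8, List.find?_cons_of_neg (by simp [h8])]
                  simp

-- find? only looks at predicate values on the list's members
theorem pvFindCongr {α : Type} (l : List α) (p q : α → Bool) (h : ∀ a ∈ l, p a = q a) :
    l.find? p = l.find? q := by
  induction l with
  | nil => rfl
  | cons a l ih =>
    have ha := h a (List.mem_cons_self)
    by_cases hp : p a = true
    · rw [List.find?_cons_of_pos hp, List.find?_cons_of_pos (ha ▸ hp)]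
    · rw [List.find?_cons_of_neg hp, List.find?_cons_of_neg (fun hq => hp (ha ▸ hq)),
        ih (fun b hb => h b (List.mem_cons_of_mem _ hb))]

-- indexing past the head of a cons
theorem pvGetDCons (x : Int) (xs : List Int) (i : Int) (hi : 1 ≤ i) :
    PySem.List.pyGetD (x :: xs) i 0 = PySem.List.pyGetD xs (i - 1) 0 := by
  obtain ⟨m, rfl⟩ : ∃ m : Nat, i = ((m + 1 : Nat) : Int) := ⟨(i - 1).toNat, by omega⟩
  rw [PySem.List.pyGetD_natCast, show ((m + 1 : Nat) : Int) - 1 = ((m : Nat) : Int) from by push_cast; ring,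
    PySem.List.pyGetD_natCast, List.getD_cons_succ]

-- the window value B reads at global bit offset p
def pvWin (l : List Int) (p : Int) : Int :=
  if PySem.Int.mod p 8 = 0 then PySem.List.pyGetD (altData l) (PySem.Int.floordiv p 8) 0
  else PySem.Int.mod (PySem.Int.floordiv
      (PySem.List.pyGetD (altData l) (PySem.Int.floordiv p 8) 0 * 256
        + PySem.List.pyGetD (altData l) (PySem.Int.floordiv p 8 + 1) 0)
      (2 ^ (8 - PySem.Int.mod p 8).toNat)) 256

-- B's scan, as a named function
def pvBfind (l : List Int) : Option Int :=
  (PySem.List.pyRange 1 (8 * ((l.length : Int) - 1) + 1) 1).find? (fun p => pvWin l p == 233)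

theorem pvAltChar (l : List Int) (h2 : 2 ≤ l.length) (hh : PySem.List.pyGetD l 0 0 ≠ 233) :
    findStartByte_alt l = (match pvBfind l with | some p => PySem.Int.mod p 8 | none => -1) := by
  simp only [findStartByte_alt, pvBfind, pvWin]
  rw [if_neg (by omega), if_neg hh]

-- window lemma, head pair: positions 1..8 read the pair (d1, d2)
theorem pvWinHead (d1 d2 : Int) (rest : List Int) (p : Int) (hp1 : 1 ≤ p) (hp8 : p ≤ 8) :
    pvWin (d1 :: d2 :: rest) p = pvWb d1 d2 p := by
  have h0 : PySem.List.pyGetD (altData (d1 :: d2 :: rest)) 0 0 = d1 % 256 := by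
    simp only [altData, List.map_cons, PySem.List.pyGetD_zero_cons, pvBand255]
  have h1 : PySem.List.pyGetD (altData (d1 :: d2 :: rest)) 1 0 = d2 % 256 := by
    simp only [altData, List.map_cons]
    rw [pvGetDCons _ _ 1 (by norm_num)]
    norm_num [PySem.List.pyGetD_zero_cons, pvBand255]
  unfold pvWin pvWb
  rw [PySem.Int.mod_eq_emod_of_pos (show (0:Int) < 8 by norm_num),
    PySem.Int.mod_eq_emod_of_pos (show (0:Int) < 256 by norm_num),
    PySem.Int.floordiv_eq_ediv_of_pos (show (0:Int) < 8 by norm_num),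
    PySem.Int.floordiv_eq_ediv_of_pos (by positivity)]
  interval_cases p <;> norm_num [h0, h1, Int.toNat]

-- window lemma, suffix: positions ≥ 9 read the tail stream
theorem pvWinSuffix (d1 d2 : Int) (rest : List Int) (p : Int) (hp9 : 9 ≤ p) :
    pvWin (d1 :: d2 :: rest) p = pvWin (d2 :: rest) (p - 8) := by
  have hm : PySem.Int.mod (p - 8) 8 = PySem.Int.mod p 8 := by
    rw [PySem.Int.mod_eq_emod_of_pos (show (0:Int) < 8 by norm_num),
      PySem.Int.mod_eq_emod_of_pos (show (0:Int) < 8 by norm_num)]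
    omega
  have hd : PySem.Int.floordiv (p - 8) 8 = PySem.Int.floordiv p 8 - 1 := by
    rw [PySem.Int.floordiv_eq_ediv_of_pos (show (0:Int) < 8 by norm_num),
      PySem.Int.floordiv_eq_ediv_of_pos (show (0:Int) < 8 by norm_num)]
    omega
  have hge : 1 ≤ PySem.Int.floordiv p 8 := by
    rw [PySem.Int.floordiv_eq_ediv_of_pos (show (0:Int) < 8 by norm_num)]
    omega
  have hAD : altData (d1 :: d2 :: rest) = PySem.Int.band d1 255 :: altData (d2 :: rest) := by
    simp [altData]
  unfold pvWin
  rw [hm, hd, hAD, pvGetDCons _ _ _ hge, pvGetDCons _ _ _ (by omega),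
    show PySem.Int.floordiv p 8 + 1 - 1 = PySem.Int.floordiv p 8 - 1 + 1 from by ring]

-- B's scan over 'd1 :: d2 :: rest' = 8 windows of the head pair, then the scan of the tail
theorem pvBfindCons (d1 d2 : Int) (rest : List Int) :
    pvBfind (d1 :: d2 :: rest)
      = (([1,2,3,4,5,6,7,8] : List Int).find? (fun x => pvWb d1 d2 x == 233)).or
          ((pvBfind (d2 :: rest)).map (· + 8)) := by
  have hlen : 8 * (((d1 :: d2 :: rest).length : Int) - 1) + 1 = 8 * (rest.length : Int) + 9 := by
    simp only [List.length_cons]; push_cast; ring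
  unfold pvBfind
  rw [hlen, PySem.List.pyRange_one_append 1 9 (8 * (rest.length : Int) + 9) (by norm_num) (by omega),
    List.find?_append]
  congr 1
  · rw [show PySem.List.pyRange 1 9 1 = ([1,2,3,4,5,6,7,8] : List Int) from by decide]
    apply pvFindCongr
    intro a ha
    have hab : 1 ≤ a ∧ a ≤ 8 := by
      fin_cases ha <;> norm_num
    rw [pvWinHead d1 d2 rest a hab.1 hab.2]
  · have hmap : PySem.List.pyRange 9 (8 * (rest.length : Int) + 9) 1
        = (PySem.List.pyRange 1 (8 * (((d2 :: rest).length : Int) - 1) + 1) 1).map (· + 8) := by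
      rw [PySem.List.pyRange_one, PySem.List.pyRange_one, List.map_map]
      have hn : ((8 * (rest.length : Int) + 9) - 9).toNat
          = ((8 * (((d2 :: rest).length : Int) - 1) + 1) - 1).toNat := by
        simp only [List.length_cons]; push_cast; omega
      rw [hn]
      apply List.map_congr_left
      intro k _
      simp only [Function.comp_apply]
      ring
    rw [hmap, List.find?_map]
    rw [pvFindCongr _ _ (fun p => pvWin (d2 :: rest) p == 233) ?_]
    intro q hq
    rw [PySem.List.mem_pyRange_one] at hq
    simp only [Function.comp_apply]
    rw [pvWinSuffix d1 d2 rest (q + 8) (by omega), show q + 8 - 8 = q from by ring]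

-- A's outer loop = B's flat scan, given that the raw head byte is not 0xE9
theorem pvLoopChar (rest : List Int) : ∀ (d1 d2 : Int), d1 ≠ 233 →
    findStartByteLoop (d1 :: d2 :: rest) = (pvBfind (d1 :: d2 :: rest)).map (· % 8) := by
  induction rest with
  | nil =>
    intro d1 d2 h
    simp only [findStartByteLoop]
    rw [pvPairChar d1 d2 h, pvBfindCons]
    cases hf : ([1,2,3,4,5,6,7,8] : List Int).find? (fun x => pvWb d1 d2 x == 233) with
    | some x => simp
    | none =>
      have hb : pvBfind ([d2] : List Int) = none := by
        unfold pvBfind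
        rw [show (8 * ((([d2] : List Int).length : Int) - 1) + 1) = 1 from by simp,
          PySem.List.pyRange_one_eq_nil (by norm_num)]
        rfl
      simp [hb]
  | cons r rs ih =>
    intro d1 d2 h
    simp only [findStartByteLoop]
    rw [pvPairChar d1 d2 h, pvBfindCons]
    cases hf : ([1,2,3,4,5,6,7,8] : List Int).find? (fun x => pvWb d1 d2 x == 233) with
    | some x => simp
    | none =>
      have hd2 : d2 ≠ 233 := by
        intro hd
        rw [List.find?_eq_none] at hf
        have := hf 8 (by norm_num)
        apply this
        simp only [pvWb, beq_iff_eq]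
        subst hd
        norm_num
      have := ih d2 r hd2
      simp only [findStartByteLoop] at this ⊢
      rw [this]
      simp only [Option.none_or, Option.map_map]
      cases pvBfind (d2 :: r :: rs) with
      | none => rfl
      | some q =>
        simp only [Option.map_some, Function.comp_apply]
        congr 1
        omega

-- ===== VERDICT (by name: the statement is the Claim_ definition above) =====
theorem findStartByte_spec : Claim_equal_findStartByte := by
  unfold Claim_equal_findStartByte
  intro l _hdom
  unfold Spec_findStartByte
  match l with
  | [] => rfl
  | [a] =>
    simp only [findStartByte, findStartByteLoop, findStartByte_alt]
    norm_num
  | d1 :: d2 :: rest =>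
    by_cases hh : d1 = 233
    · subst hh
      have hA : findStartByte (233 :: d2 :: rest) = 0 := by
        unfold findStartByte
        simp only [findStartByteLoop]
        rw [pairGo_lt _ _ 0 (by norm_num), if_pos rfl]
        rfl
      have hB : findStartByte_alt (233 :: d2 :: rest) = 0 := by
        simp only [findStartByte_alt]
        rw [if_neg (by simp only [List.length_cons]; push_cast; omega),
          if_pos (by rw [PySem.List.pyGetD_zero_cons])]
      rw [hA, hB]
    · rw [pvAltChar _ (by simp only [List.length_cons]; omega)
        (by rw [PySem.List.pyGetD_zero_cons]; exact hh)]
      unfold findStartByte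
      rw [pvLoopChar rest d1 d2 hh]
      cases hb : pvBfind (d1 :: d2 :: rest) with
      | none => rfl
      | some p =>
        have hp1 : 1 ≤ p := by
          have hmem := List.mem_of_find?_eq_some hb
          rw [PySem.List.mem_pyRange_one] at hmem
          exact hmem.1
        simp only [Option.map_some, Option.getD_some]
        rw [PySem.Int.mod_eq_emod_of_pos (by norm_num : (0:Int) < 8)]
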